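-- pv_equiv track=rewrite | github.com/lkkbox/pytools | plottools.py | trimDecimalZeros
-- ===== SOURCE A (Python) =====
-- def trimDecimalZeros(str):
--     if '.' not in str:
--         return str
--     for iDecimal, digit in enumerate(str[::-1]):
--         if digit != '0':
--             break
--     if str[-(iDecimal+1)] == '.':
--         return str[:-(iDecimal+1)]
--     elif iDecimal == 0:
--         return str
--     else:
--         return str[:-iDecimal]
-- ===== SOURCE B (Python) =====
-- def trimDecimalZeros(str):
--     if '.' not in str:
--         return str
--     # single forward pass: 'pending' buffers a candidate suffix of the form
--     # (optional '.') followed by '0's; it is flushed into 'out' whenever a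
--     # character proves it is not the trailing suffix, and discarded at the end.
--     out = []
--     pending = []
--     for c in str:
--         if c == '0':
--             pending.append(c)
--         elif c == '.':
--             out += pending
--             pending = ['.']
--         else:
--             out += pending
--             out.append(c)
--             pending = []
--     return ''.join(out)
-- ===== Notes on version B (the rewrite author's own statement) =====
-- stated objective: alternative
-- what changed: Replaces A's reverse enumerate-scan with index arithmetic and a three-way branch by a single forward pass over the string maintaining an output list plus a pending buffer of candidate-trailing '.'/'0' characters that is flushed on any other character and discarded at the end.
import Mathlib
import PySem

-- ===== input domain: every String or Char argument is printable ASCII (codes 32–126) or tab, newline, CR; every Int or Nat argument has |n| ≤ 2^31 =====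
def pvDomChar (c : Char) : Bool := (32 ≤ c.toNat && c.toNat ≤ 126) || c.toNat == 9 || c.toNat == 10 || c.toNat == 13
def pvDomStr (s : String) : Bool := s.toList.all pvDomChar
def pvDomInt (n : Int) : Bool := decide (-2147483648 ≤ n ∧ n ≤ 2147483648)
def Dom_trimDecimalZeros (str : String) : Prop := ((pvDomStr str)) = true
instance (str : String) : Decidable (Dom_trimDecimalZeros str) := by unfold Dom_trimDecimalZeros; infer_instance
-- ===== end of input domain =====

-- B replaces A's reverse enumerate-scan with index arithmetic and a three-way branch by a
-- single forward pass holding an out/pending-buffer accumulator (objective: alternative).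

-- ===== PORT A =====
-- the 'for iDecimal, digit in enumerate(str[::-1]): if digit != '0': break' loop:
-- returns the enumerate counter at the break; if the loop exhausts, Python leaves the
-- last counter value (i-1), reachable only when '.' ∉ str, i.e. never after A's guard
def pvScanA : List Char → Nat → Nat
  | [], i => i - 1
  | c :: rest, i => if c ≠ '0' then i else pvScanA rest (i + 1)

def trimDecimalZeros (str : String) : String :=
  if ¬ (PySem.Str.isIn "." str = true) then str
  else
    let cs := str.toList
    let iDecimal : Nat := pvScanA cs.reverse 0
    if PySem.List.pyGet? cs (-((iDecimal : Int) + 1)) = some '.' then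
      String.ofList (PySem.List.slice cs none (some (-((iDecimal : Int) + 1))))
    else if iDecimal = 0 then str
    else String.ofList (PySem.List.slice cs none (some (-(iDecimal : Int))))

-- ===== PORT B =====
-- one step of B's forward loop; the state is (out, pending)
def pvStepB (st : List Char × List Char) (c : Char) : List Char × List Char :=
  if c = '0' then (st.1, st.2 ++ [c])
  else if c = '.' then (st.1 ++ st.2, ['.'])
  else (st.1 ++ st.2 ++ [c], [])

def trimDecimalZeros_alt (str : String) : String :=
  if ¬ (PySem.Str.isIn "." str = true) then str
  else String.ofList ((str.toList.foldl pvStepB ([], [])).1)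

-- ===== PRECONDITION & SPEC =====
def Spec_trimDecimalZeros (str : String) (out : String) : Prop := out = trimDecimalZeros_alt str
instance (str : String) (out : String) : Decidable (Spec_trimDecimalZeros str out) := by unfold Spec_trimDecimalZeros; infer_instance

-- ===== CLAIM (what is proved, stated in full; the proofs are below) =====
def Claim_equal_trimDecimalZeros : Prop := ∀ (str : String), Dom_trimDecimalZeros str → Spec_trimDecimalZeros str (trimDecimalZeros str)

-- ===== LEMMAS AND PROOFS =====

-- reference function: drop the trailing zeros, then one adjacent trailing '.' if present
def gRef (cs : List Char) : List Char :=
  let r := cs.reverse.dropWhile (· == '0')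
  if r.head? = some '.' then r.tail.reverse else r.reverse

theorem gRef_append_zero (xs : List Char) : gRef (xs ++ ['0']) = gRef xs := by
  simp [gRef]

theorem gRef_append_dot (xs cs : List Char) :
    gRef (xs ++ '.' :: cs) = xs ++ gRef ('.' :: cs) := by
  unfold gRef
  have h1 : (xs ++ '.' :: cs).reverse = cs.reverse ++ ('.' :: xs.reverse) := by simp
  have h2 : ('.' :: cs).reverse = cs.reverse ++ ['.'] := by simp
  rw [h1, h2, List.dropWhile_append, List.dropWhile_append]
  cases hd : cs.reverse.dropWhile (· == '0') with
  | nil => simp [List.dropWhile]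
  | cons a t =>
    simp only [List.isEmpty_cons]
    by_cases ha : a = '.'
    · subst ha; simp
    · simp [List.head?, ha]

theorem gRef_append_other (xs cs : List Char) (c : Char) (h0 : c ≠ '0') (hd : c ≠ '.') :
    gRef (xs ++ c :: cs) = xs ++ c :: gRef cs := by
  unfold gRef
  have h1 : (xs ++ c :: cs).reverse = cs.reverse ++ (c :: xs.reverse) := by simp
  rw [h1, List.dropWhile_append]
  cases hcase : cs.reverse.dropWhile (· == '0') with
  | nil =>
    have hb : (c == '0') = false := by simpa using h0
    simp [List.dropWhile, hb, List.head?, hd]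
  | cons a t =>
    simp only [List.isEmpty_cons]
    by_cases ha : a = '.'
    · subst ha; simp
    · simp [List.head?, ha]

theorem gRef_nil : gRef [] = [] := by simp [gRef]

theorem gRef_dot : gRef ['.'] = [] := by simp [gRef]

theorem foldB_eq (cs : List Char) : ∀ (out pend : List Char), gRef pend = [] →
    (List.foldl pvStepB (out, pend) cs).1 = out ++ gRef (pend ++ cs) := by
  induction cs with
  | nil => intro out pend h; simp [h]
  | cons c cs ih =>
    intro out pend h
    rw [List.foldl_cons]
    by_cases h0 : c = '0'
    · subst h0
      have hp : gRef (pend ++ ['0']) = [] := by rw [gRef_append_zero]; exact h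
      rw [show pvStepB (out, pend) '0' = (out, pend ++ ['0']) from by simp [pvStepB]]
      rw [ih out (pend ++ ['0']) hp]
      congr 1
      simp
    · by_cases hdot : c = '.'
      · subst hdot
        rw [show pvStepB (out, pend) '.' = (out ++ pend, ['.']) from by simp [pvStepB]]
        rw [ih (out ++ pend) ['.'] gRef_dot]
        rw [show ['.'] ++ cs = '.' :: cs from rfl, gRef_append_dot]
        simp
      · rw [show pvStepB (out, pend) c = (out ++ pend ++ [c], []) from by
          simp [pvStepB, h0, hdot]]
        rw [ih (out ++ pend ++ [c]) [] gRef_nil]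
        rw [List.nil_append, gRef_append_other pend cs c h0 hdot]
        simp

-- A's three-way branch computes gRef whenever '.' occurs in the string
theorem pvScanA_eq (r : List Char) (j : Nat) (h : ∃ c ∈ r, c ≠ '0') :
    pvScanA r j = j + (r.takeWhile (· == '0')).length := by
  induction r generalizing j with
  | nil => simp at h
  | cons c rest ih =>
    by_cases hc : c = '0'
    · subst hc
      have h' : ∃ c ∈ rest, c ≠ '0' := by
        obtain ⟨d, hd, hne⟩ := h
        rcases List.mem_cons.mp hd with h1 | h1
        · exact absurd h1 hne
        · exact ⟨d, h1, hne⟩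
      simp [pvScanA, ih _ h', List.takeWhile]
      omega
    · have hb : (c == '0') = false := by simpa using hc
      simp [pvScanA, hc, List.takeWhile, hb]

theorem A_eq_gRef (str : String) (hin : PySem.Str.isIn "." str = true) :
    trimDecimalZeros str = String.ofList (gRef str.toList) := by
  unfold trimDecimalZeros
  simp only [hin, not_true_eq_false, if_false]
  have hdot : ('.' : Char) ∈ str.toList := by
    have h1 := (PySem.Str.isIn_iff_infix (sub := ".") (s := str)).mp hin
    have h2 : [('.' : Char)] <:+: str.toList := by simpa using h1
    exact (List.singleton_infix_iff _ _).mp h2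
  set cs := str.toList with hcs
  have hr : ('.' : Char) ∈ cs.reverse := by simpa using hdot
  have hdnil : cs.reverse.dropWhile (· == '0') ≠ [] := by
    intro h
    have := (List.dropWhile_eq_nil_iff).mp h '.' hr
    simp at this
  obtain ⟨hd, tl, hdtl⟩ := List.exists_cons_of_ne_nil hdnil
  have hscan : pvScanA cs.reverse 0 = (cs.reverse.takeWhile (· == '0')).length := by
    simpa using pvScanA_eq cs.reverse 0 ⟨'.', hr, by decide⟩
  set t := cs.reverse.takeWhile (· == '0') with ht
  have hcs_eq : cs = tl.reverse ++ (hd :: t.reverse) := by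
    conv_lhs => rw [← cs.reverse_reverse]
    rw [← List.takeWhile_append_dropWhile (p := (· == '0')) (l := cs.reverse), hdtl, ← ht]
    simp
  have hlen : cs.length = tl.length + (1 + t.length) := by
    rw [hcs_eq]; simp [Nat.add_comm]
  have hget : PySem.List.pyGet? cs (-((pvScanA cs.reverse 0 : Int) + 1)) = some hd := by
    rw [hscan]
    have hcast : -((t.length : Int) + 1) = -(((t.length + 1 : Nat) : Int)) := by push_cast; ring
    rw [hcast, PySem.List.pyGet?_neg_natCast cs (t.length + 1) (by omega) (by omega)]
    rw [show cs.length - (t.length + 1) = tl.length by omega]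
    rw [hcs_eq, List.getElem?_append_right (by simp)]
    simp
  have hg : gRef cs = if hd = '.' then tl.reverse else tl.reverse ++ [hd] := by
    unfold gRef
    rw [hdtl]
    by_cases hhd : hd = '.'
    · simp [hhd]
    · simp [List.head?, hhd]
  rw [hget]
  by_cases hhd : hd = '.'
  · subst hhd
    rw [if_pos rfl, hg, if_pos rfl]
    have hsl : PySem.List.slice cs none (some (-((pvScanA cs.reverse 0 : Int) + 1)))
        = tl.reverse := by
      rw [hscan]
      have hcast : -((t.length : Int) + 1) = -(((t.length + 1 : Nat) : Int)) := by push_cast; ring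
      rw [hcast, PySem.List.slice_to_neg_natCast cs (t.length + 1) (by omega)]
      rw [show cs.length - (t.length + 1) = tl.length by omega]
      rw [hcs_eq, show tl.length = tl.reverse.length by simp, List.take_append_length]
    rw [hsl]
  · rw [if_neg (show ¬ (some hd = some ('.' : Char)) by simpa using hhd), hg, if_neg hhd]
    by_cases hi0 : pvScanA cs.reverse 0 = 0
    · rw [if_pos hi0]
      rw [hscan] at hi0
      have ht0 : t = [] := List.eq_nil_of_length_eq_zero hi0
      rw [ht0] at hcs_eq
      simp only [List.reverse_nil] at hcs_eq
      have hcseq : cs = tl.reverse ++ [hd] := by simpa using hcs_eq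
      rw [← hcseq]
      exact String.ofList_toList.symm
    · rw [if_neg hi0]
      have hsl : PySem.List.slice cs none (some (-(pvScanA cs.reverse 0 : Int)))
          = tl.reverse ++ [hd] := by
        rw [hscan]
        rw [PySem.List.slice_to_neg_natCast cs t.length (by omega)]
        rw [show cs.length - t.length = tl.reverse.length + 1 by simp; omega]
        rw [hcs_eq, List.take_append]
        simp
      rw [hsl]

-- ===== VERDICT (by name: the statement is the Claim_ definition above) =====
theorem trimDecimalZeros_spec : Claim_equal_trimDecimalZeros := by
  intro str _
  unfold Spec_trimDecimalZeros
  by_cases hin : PySem.Str.isIn "." str = true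
  · rw [A_eq_gRef str hin]
    unfold trimDecimalZeros_alt
    simp only [hin, not_true_eq_false, if_false]
    rw [foldB_eq str.toList [] [] gRef_nil]
    simp
  · have h2 : PySem.Chars.isIn ['.'] str.toList = false := by simpa using hin
    unfold trimDecimalZeros trimDecimalZeros_alt
    simp [h2]
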